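-- pv_equiv track=rewrite | github.com/yeongseon/docprep | src/docprep/chunkers/_markdown.py | _table_spans_and_boundaries
-- ===== SOURCE A (Python) =====
-- def _table_spans_and_boundaries(
--     line_spans: list[tuple[int, int, str, bool]],
-- ) -> tuple[list[tuple[int, int]], set[int]]:
--     protected: list[tuple[int, int]] = []
--     boundaries: set[int] = set()
--
--     in_table = False
--     table_start = 0
--     last_row_boundary = 0
--     for line_start, line_end, content, has_newline in line_spans:
--         is_table_row = _is_table_row(content)
--         row_boundary = line_end - 1 if has_newline else line_end
--         if is_table_row:
--             if not in_table:
--                 in_table = True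
--                 table_start = line_start
--             protected.append((line_start, row_boundary))
--             boundaries.add(row_boundary)
--             last_row_boundary = row_boundary
--             continue
--
--         if in_table:
--             boundaries.add(table_start)
--             boundaries.add(last_row_boundary)
--             in_table = False
--
--     if in_table:
--         boundaries.add(table_start)
--         boundaries.add(last_row_boundary)
--
--     return protected, boundaries
--
-- def _is_table_row(content: str) -> bool:
--     stripped = content.strip()
--     return "|" in stripped and stripped != ""
-- ===== SOURCE B (Python) =====
-- def _is_table_row(content: str) -> bool:
--     stripped = content.strip()
--     return "|" in stripped and stripped != ""
--
--
-- def _table_spans_and_boundaries(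
--     line_spans: list[tuple[int, int, str, bool]],
-- ) -> tuple[list[tuple[int, int]], set[int]]:
--     # Run-based decomposition: scan for maximal runs of table rows and
--     # process each run as a whole, instead of in_table/table_start/last_row
--     # flag bookkeeping.
--     protected: list[tuple[int, int]] = []
--     boundaries: set[int] = set()
--     n = len(line_spans)
--     i = 0
--     while i < n:
--         if not _is_table_row(line_spans[i][2]):
--             i += 1
--             continue
--         j = i
--         rows: list[tuple[int, int]] = []
--         while j < n and _is_table_row(line_spans[j][2]):
--             ls, le, _, hn = line_spans[j]
--             rows.append((ls, le - 1 if hn else le))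
--             j += 1
--         protected.extend(rows)
--         boundaries.update(rb for _, rb in rows)
--         boundaries.add(rows[0][0])
--         boundaries.add(rows[-1][1])
--         i = j
--     return protected, boundaries
-- ===== Notes on version B (the rewrite author's own statement) =====
-- stated objective: alternative
-- what changed: Replaces A's single pass with in_table/table_start/last_row_boundary flag bookkeeping by a run-based decomposition: an outer loop finds each maximal run of table rows, an inner loop collects the run's rows, and the run is processed as a whole (extend protected, add its row boundaries, then its first line_start and last row boundary).
import Mathlib
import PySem

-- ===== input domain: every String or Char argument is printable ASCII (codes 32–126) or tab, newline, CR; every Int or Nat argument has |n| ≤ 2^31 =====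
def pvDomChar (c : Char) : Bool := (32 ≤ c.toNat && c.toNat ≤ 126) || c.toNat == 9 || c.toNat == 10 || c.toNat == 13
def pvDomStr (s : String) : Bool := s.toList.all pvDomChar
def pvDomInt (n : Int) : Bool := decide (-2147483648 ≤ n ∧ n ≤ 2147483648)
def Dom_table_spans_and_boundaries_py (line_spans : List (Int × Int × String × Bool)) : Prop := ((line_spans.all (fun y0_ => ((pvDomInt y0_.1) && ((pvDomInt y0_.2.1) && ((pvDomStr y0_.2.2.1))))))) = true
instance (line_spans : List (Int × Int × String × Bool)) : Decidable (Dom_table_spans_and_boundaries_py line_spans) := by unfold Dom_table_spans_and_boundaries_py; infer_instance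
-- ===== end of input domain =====

-- B replaces A's in_table/table_start/last_row_boundary flag bookkeeping by an
-- explicit decomposition into maximal runs of table rows, processed whole (alternative decomposition).

-- ===== PORT A =====
-- _is_table_row (shared module helper, used verbatim by both Pythons)
def pvIsTableRow (content : String) : Bool :=
  let stripped := PySem.Str.strip content
  PySem.Str.isIn "|" stripped && stripped != ""

-- loop body of A: state (protected, boundaries, in_table, table_start, last_row_boundary)
def pvAStep (st : (List (Int × Int)) × PySem.Set Int × Bool × Int × Int)
    (x : Int × Int × String × Bool) : (List (Int × Int)) × PySem.Set Int × Bool × Int × Int :=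
  let (prot, bnd, inTable, tableStart, lastRB) := st
  let (ls, le, content, hn) := x
  let isRow := pvIsTableRow content
  let rb := if hn then le - 1 else le
  if isRow then
    let ts := if inTable then tableStart else ls
    (prot ++ [(ls, rb)], PySem.Set.add bnd rb, true, ts, rb)
  else if inTable then
    (prot, PySem.Set.add (PySem.Set.add bnd tableStart) lastRB, false, tableStart, lastRB)
  else
    (prot, bnd, false, tableStart, lastRB)

def table_spans_and_boundaries_py (line_spans : List (Int × Int × String × Bool)) : (List (Int × Int)) × List Int :=
  let st := line_spans.foldl pvAStep ([], PySem.Set.empty, false, 0, 0)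
  let bnd := if st.2.2.1 then PySem.Set.add (PySem.Set.add st.2.1 st.2.2.2.1) st.2.2.2.2 else st.2.1
  (st.1, bnd)

-- ===== PORT B =====
-- per-row (line_start, row_boundary), as built by B's inner while-loop
def pvRowOf (t : Int × Int × String × Bool) : Int × Int :=
  (t.1, if t.2.2.2 then t.2.1 - 1 else t.2.1)

-- B's outer while-loop over indices, as structural recursion: skip a non-table
-- line, otherwise consume the maximal run of table rows and process it whole.
def pvAltGo : List (Int × Int × String × Bool) → (List (Int × Int)) × PySem.Set Int →
    (List (Int × Int)) × PySem.Set Int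
  | [], acc => acc
  | x :: rest, (prot, bnd) =>
    if h : pvIsTableRow x.2.2.1 = true then
      let run := (x :: rest).takeWhile (fun t => pvIsTableRow t.2.2.1)
      let rest' := (x :: rest).dropWhile (fun t => pvIsTableRow t.2.2.1)
      let rows := run.map pvRowOf
      let bnd1 := PySem.Set.update bnd (rows.map Prod.snd)
      let bnd2 := PySem.Set.add (PySem.Set.add bnd1 rows.head!.1) rows.getLast!.2
      pvAltGo rest' (prot ++ rows, bnd2)
    else
      pvAltGo rest (prot, bnd)
  termination_by xs _ => xs.length
  decreasing_by
  · simp only [List.dropWhile_cons, h, if_true]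
    exact Nat.lt_succ_of_le (List.length_dropWhile_le _ _)
  · simp

def table_spans_and_boundaries_py_alt (line_spans : List (Int × Int × String × Bool)) : (List (Int × Int)) × List Int :=
  pvAltGo line_spans ([], PySem.Set.empty)

-- ===== PRECONDITION & SPEC =====
def Spec_table_spans_and_boundaries_py (line_spans : List (Int × Int × String × Bool)) (out : (List (Int × Int)) × List Int) : Prop := out = table_spans_and_boundaries_py_alt line_spans
instance (line_spans : List (Int × Int × String × Bool)) (out : (List (Int × Int)) × List Int) : Decidable (Spec_table_spans_and_boundaries_py line_spans out) := by unfold Spec_table_spans_and_boundaries_py; infer_instance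

-- ===== CLAIM (what is proved, stated in full; the proofs are below) =====
def Claim_equal_table_spans_and_boundaries_py : Prop := ∀ (line_spans : List (Int × Int × String × Bool)), Dom_table_spans_and_boundaries_py line_spans → Spec_table_spans_and_boundaries_py line_spans (table_spans_and_boundaries_py line_spans)

-- ===== LEMMAS AND PROOFS =====

-- trailing fixup of A, split out for the loop invariant
def pvFinish (st : (List (Int × Int)) × PySem.Set Int × Bool × Int × Int) : (List (Int × Int)) × List Int :=
  (st.1, if st.2.2.1 then PySem.Set.add (PySem.Set.add st.2.1 st.2.2.2.1) st.2.2.2.2 else st.2.1)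

set_option maxHeartbeats 1000000

theorem pvFoldLast (l : List (Int × Int)) : ∀ (a : Int × Int),
    List.foldl (fun (_ : Int) r => r.2) a.2 l = ((a :: l).getLast!).2 := by
  induction l with
  | nil =>
    intro a
    unfold List.getLast!
    simp
  | cons b bs ih =>
    intro a
    have hl : ((a :: b :: bs : List (Int × Int)).getLast!) = ((b :: bs : List (Int × Int)).getLast!) := by
      unfold List.getLast!
      simp
    rw [List.foldl_cons, hl]
    exact ih b

-- A's fold over a run of table rows, starting inside a table
theorem pvRunLemma (run : List (Int × Int × String × Bool))
    (hall : ∀ t ∈ run, pvIsTableRow t.2.2.1 = true) :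
    ∀ (prot : List (Int × Int)) (bnd : PySem.Set Int) (ts lrb : Int),
    List.foldl pvAStep (prot, bnd, true, ts, lrb) run =
      (prot ++ run.map pvRowOf,
       PySem.Set.update bnd ((run.map pvRowOf).map Prod.snd),
       true, ts,
       List.foldl (fun (_ : Int) r => r.2) lrb (run.map pvRowOf)) := by
  induction run with
  | nil => intro prot bnd ts lrb; simp [PySem.Set.update]
  | cons t rest ih =>
    intro prot bnd ts lrb
    have ht : pvIsTableRow t.2.2.1 = true := hall t (by simp)
    have hrest : ∀ u ∈ rest, pvIsTableRow u.2.2.1 = true :=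
      fun u hu => hall u (by simp [hu])
    obtain ⟨ls, le, content, hn⟩ := t
    simp only [List.foldl_cons, pvAStep, ht, if_true]
    rw [ih hrest]
    simp [pvRowOf, PySem.Set.update]

-- head of the dropWhile result falsifies the predicate
theorem pvDropHead {α : Type} (p : α → Bool) (l : List α) (y : α) (ys : List α)
    (h : l.dropWhile p = y :: ys) : p y = false := by
  induction l with
  | nil => simp at h
  | cons a as ih =>
    by_cases ha : p a = true
    · rw [List.dropWhile_cons, if_pos ha] at h
      exact ih h
    · rw [List.dropWhile_cons, if_neg ha] at h
      cases h
      simpa using ha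

-- main loop invariant: A's fold (plus trailing fixup) from an out-of-table
-- state equals B's run-based recursion, for any pending accumulators
theorem pvMain : ∀ (n : Nat) (xs : List (Int × Int × String × Bool)), xs.length ≤ n →
    ∀ (prot : List (Int × Int)) (bnd : PySem.Set Int) (ts lrb : Int),
    pvFinish (List.foldl pvAStep (prot, bnd, false, ts, lrb) xs) = pvAltGo xs (prot, bnd) := by
  intro n
  induction n with
  | zero =>
    intro xs hxs prot bnd ts lrb
    have : xs = [] := List.eq_nil_of_length_eq_zero (Nat.le_zero.mp hxs)
    subst this
    simp [pvAltGo, pvFinish]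
  | succ n ih =>
    intro xs hxs prot bnd ts lrb
    match xs with
    | [] => simp [pvAltGo, pvFinish]
    | x :: rest =>
      by_cases h : pvIsTableRow x.2.2.1 = true
      · -- table run begins at x
        obtain ⟨ls, le, content, hn⟩ := x
        have h' : pvIsTableRow content = true := h
        have hsplit : (⟨ls, le, content, hn⟩ :: rest : List (Int × Int × String × Bool)) =
            ((⟨ls, le, content, hn⟩ :: rest).takeWhile (fun t => pvIsTableRow t.2.2.1)) ++
            ((⟨ls, le, content, hn⟩ :: rest).dropWhile (fun t => pvIsTableRow t.2.2.1)) :=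
          (List.takeWhile_append_dropWhile).symm
        have htw : (⟨ls, le, content, hn⟩ :: rest : List (Int × Int × String × Bool)).takeWhile (fun t => pvIsTableRow t.2.2.1) =
            ⟨ls, le, content, hn⟩ :: rest.takeWhile (fun t => pvIsTableRow t.2.2.1) := by
          simp [h']
        have hdw : (⟨ls, le, content, hn⟩ :: rest : List (Int × Int × String × Bool)).dropWhile (fun t => pvIsTableRow t.2.2.1) =
            rest.dropWhile (fun t => pvIsTableRow t.2.2.1) := by
          simp [h']
        -- unfold B one step
        rw [pvAltGo]
        simp only [h, dif_pos, htw, hdw]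
        -- A: split the fold at the end of the run
        set tw := rest.takeWhile (fun t => pvIsTableRow t.2.2.1) with htwdef
        set dw := rest.dropWhile (fun t => pvIsTableRow t.2.2.1) with hdwdef
        have hresteq : rest = tw ++ dw := (List.takeWhile_append_dropWhile).symm
        have halltw : ∀ u ∈ tw, pvIsTableRow u.2.2.1 = true := by
          intro u hu
          exact List.mem_takeWhile_imp (p := fun t : Int × Int × String × Bool => pvIsTableRow t.2.2.1) hu
        conv_lhs => rw [hresteq]
        rw [List.foldl_cons, List.foldl_append]
        have hstep : pvAStep (prot, bnd, false, ts, lrb) ⟨ls, le, content, hn⟩ =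
            (prot ++ [pvRowOf ⟨ls, le, content, hn⟩],
             PySem.Set.add bnd (pvRowOf ⟨ls, le, content, hn⟩).2, true, ls,
             (pvRowOf ⟨ls, le, content, hn⟩).2) := by
          simp [pvAStep, h', pvRowOf]
        rw [hstep, pvRunLemma tw halltw]
        -- align B's run quantities
        have hrows : (⟨ls, le, content, hn⟩ :: tw : List (Int × Int × String × Bool)).map pvRowOf =
            pvRowOf ⟨ls, le, content, hn⟩ :: tw.map pvRowOf := by simp
        have hhead : ((⟨ls, le, content, hn⟩ :: tw).map pvRowOf).head!.1 = ls := by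
          simp [pvRowOf]
        have hupd : PySem.Set.update bnd (((⟨ls, le, content, hn⟩ :: tw).map pvRowOf).map Prod.snd) =
            PySem.Set.update (PySem.Set.add bnd (pvRowOf ⟨ls, le, content, hn⟩).2) ((tw.map pvRowOf).map Prod.snd) := by
          simp [PySem.Set.update]
        have hlastrb : List.foldl (fun (_ : Int) r => r.2) (pvRowOf ⟨ls, le, content, hn⟩).2 (tw.map pvRowOf) =
            (((⟨ls, le, content, hn⟩ :: tw).map pvRowOf).getLast!).2 := by
          rw [hrows]
          exact pvFoldLast _ _
        match hdwe : dw with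
        | [] =>
          -- unterminated trailing table: the final fixup closes it
          simp only [List.foldl_nil, pvAltGo, pvFinish]
          rw [hupd, hhead, ← hlastrb]
          simp
        | y :: ys =>
          -- the run is closed by the non-table line y
          have hy : pvIsTableRow y.2.2.1 = false := pvDropHead _ rest y ys hdwdef.symm
          rw [List.foldl_cons]
          have hstep2 : ∀ (P : List (Int × Int)) (B : PySem.Set Int) (TS LRB : Int),
              pvAStep (P, B, true, TS, LRB) y =
              (P, PySem.Set.add (PySem.Set.add B TS) LRB, false, TS, LRB) := by
            intro P B TS LRB
            obtain ⟨a, b, c, d⟩ := y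
            simp only [pvAStep]
            simp [show pvIsTableRow c = false from hy]
          rw [hstep2]
          have hys : ys.length ≤ n := by
            have h1 : (List.dropWhile (fun t => pvIsTableRow t.2.2.1) rest).length ≤ rest.length :=
              List.length_dropWhile_le _ _
            rw [← hdwdef] at h1
            have h2 : rest.length ≤ n := Nat.le_of_succ_le_succ hxs
            simp only [List.length_cons] at h1
            omega
          rw [ih ys hys]
          -- B skips y and recurses on ys with the same accumulators
          rw [pvAltGo]
          simp only [hy, Bool.false_eq_true, dif_neg, not_false_iff]
          congr 1
          rw [hupd, hhead, ← hlastrb]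
          simp
      · -- non-table line outside a table: both sides skip it
        have hstep : pvAStep (prot, bnd, false, ts, lrb) x = (prot, bnd, false, ts, lrb) := by
          obtain ⟨a, b, c, d⟩ := x
          simp only [pvAStep]
          simp [show pvIsTableRow c = false by simpa using h]
        rw [List.foldl_cons, hstep, pvAltGo]
        simp only [h]
        exact ih rest (Nat.le_of_succ_le_succ hxs) prot bnd ts lrb

-- ===== VERDICT (by name: the statement is the Claim_ definition above) =====
theorem table_spans_and_boundaries_py_spec : Claim_equal_table_spans_and_boundaries_py := by
  intro line_spans _
  unfold Spec_table_spans_and_boundaries_py table_spans_and_boundaries_py table_spans_and_boundaries_py_alt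
  have := pvMain line_spans.length line_spans (le_refl _) [] PySem.Set.empty 0 0
  simpa [pvFinish] using this
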